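-- pv_equiv track=rewrite | github.com/clr4takeoff/2024-Fall-Algorithm | chap3/LN_SCC_Example.py | map_vertices
-- ===== SOURCE A (Python) =====
-- def map_vertices(edges):
--     mapping = {}
--     reverse_mapping = {}
--     current_index = 0
--
--     # 문자열 정점을 정수로 매핑
--     for u, v in edges:
--         if u not in mapping:
--             mapping[u] = current_index
--             reverse_mapping[current_index] = u
--             current_index += 1
--         if v not in mapping:
--             mapping[v] = current_index
--             reverse_mapping[current_index] = v
--             current_index += 1
--
--     # 매핑된 정점들로 간선을 변환
--     mapped_edges = [(mapping[u], mapping[v]) for u, v in edges]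
--
--     return mapped_edges, reverse_mapping
-- ===== SOURCE B (Python) =====
-- def map_vertices(edges):
--     flat = [x for uv in edges for x in uv]
--     ordered = sorted(set(flat), key=flat.index)
--     mapping = {v: i for i, v in enumerate(ordered)}
--     mapped_edges = [(mapping[u], mapping[v]) for u, v in edges]
--     reverse_mapping = {i: v for i, v in enumerate(ordered)}
--     return mapped_edges, reverse_mapping
-- ===== Notes on version B (the rewrite author's own statement) =====
-- stated objective: alternative
-- what changed: Replaces A's inline membership-check/counter loop that numbers vertices while scanning edges with a sort-based construction: flatten the vertex stream, take its set, sort the distinct vertices by their first-occurrence index (list.index), and derive both index tables by enumerate before a separate remap pass.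
import Mathlib
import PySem

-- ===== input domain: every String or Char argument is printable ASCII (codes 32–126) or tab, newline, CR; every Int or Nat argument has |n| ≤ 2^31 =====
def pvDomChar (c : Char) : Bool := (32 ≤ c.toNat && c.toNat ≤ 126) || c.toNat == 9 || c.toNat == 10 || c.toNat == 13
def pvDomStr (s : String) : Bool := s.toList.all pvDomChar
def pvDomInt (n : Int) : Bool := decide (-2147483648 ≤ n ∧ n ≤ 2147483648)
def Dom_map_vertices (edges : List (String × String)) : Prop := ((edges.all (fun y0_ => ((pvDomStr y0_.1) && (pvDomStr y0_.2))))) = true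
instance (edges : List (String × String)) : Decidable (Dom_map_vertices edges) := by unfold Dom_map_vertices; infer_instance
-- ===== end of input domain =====

-- B replaces A's inline membership-check/counter loop with a sort-based construction:
-- sort the distinct vertices by first-occurrence index, then enumerate; objective: alternative.

-- ===== PORT A =====
-- the body of A's two identical 'if x not in mapping' blocks (applied to u then v)
def mapVerticesStep (st : PySem.Dict String Int × PySem.Dict Int String × Int) (x : String) :
    PySem.Dict String Int × PySem.Dict Int String × Int :=
  if st.1.contains x then st
  else (st.1.insert x st.2.2, st.2.1.insert st.2.2 x, st.2.2 + 1)

def map_vertices (edges : List (String × String)) : (List (Int × Int)) × (List (Int × String)) :=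
  let st := edges.foldl (fun st uv => mapVerticesStep (mapVerticesStep st uv.1) uv.2)
    (PySem.Dict.empty, PySem.Dict.empty, 0)
  -- mapping[u] / mapping[v]: the key is always present at that point, so getD is exact
  let mapped := edges.map (fun uv => (st.1.getD uv.1 0, st.1.getD uv.2 0))
  (mapped, st.2.1.items)

-- ===== PORT B =====
def map_vertices_alt (edges : List (String × String)) : (List (Int × Int)) × (List (Int × String)) :=
  let flat := edges.flatMap (fun uv => [uv.1, uv.2])
  -- sorted(set(flat), key=flat.index): the key is injective on the set, so the Set order is consumed safely;
  -- flat.index(x) always finds x ∈ flat, so getD is exact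
  let ordered := PySem.List.sorted (PySem.Set.ofList flat)
    (fun x => (((PySem.List.index? flat x).getD 0 : Nat) : Int)) false
  let mapping : PySem.Dict String Int :=
    PySem.Dict.ofList ((PySem.List.enumerate ordered).map (fun p => (p.2, p.1)))
  let mapped := edges.map (fun uv => (mapping.getD uv.1 0, mapping.getD uv.2 0))
  let rev : PySem.Dict Int String := PySem.Dict.ofList (PySem.List.enumerate ordered)
  (mapped, rev.items)

-- ===== PRECONDITION & SPEC =====
def Spec_map_vertices (edges : List (String × String)) (out : (List (Int × Int)) × (List (Int × String))) : Prop := out = map_vertices_alt edges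
instance (edges : List (String × String)) (out : (List (Int × Int)) × (List (Int × String))) : Decidable (Spec_map_vertices edges out) := by unfold Spec_map_vertices; infer_instance

-- ===== CLAIM (what is proved, stated in full; the proofs are below) =====
def Claim_equal_map_vertices : Prop := ∀ (edges : List (String × String)), Dom_map_vertices edges → Spec_map_vertices edges (map_vertices edges)

-- ===== LEMMAS AND PROOFS =====

-- first-occurrence indices are strictly increasing along set(xs)'s first-appearance order
lemma pairwise_idx (l : List String) :
    (PySem.Set.ofList l).Pairwise
      (fun a b => (((PySem.List.index? l a).getD 0 : Nat) : Int) < ((PySem.List.index? l b).getD 0 : Nat)) := by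
  induction l using List.reverseRecOn with
  | nil => simp [PySem.Set.ofList]
  | append_singleton l x ih =>
      have hof : PySem.Set.ofList (l ++ [x]) = PySem.Set.add (PySem.Set.ofList l) x := by
        simp [PySem.Set.ofList, List.foldl_append]
      have hmemof : ∀ a, a ∈ PySem.Set.ofList l → a ∈ l := by
        intro a ha
        have := (PySem.List.mem_dedup l a).1 (by simpa using ha)
        exact this
      have hkeep : ∀ a ∈ PySem.Set.ofList l,
          PySem.List.index? (l ++ [x]) a = PySem.List.index? l a := fun a ha =>
        PySem.List.index?_append_of_mem _ (hmemof a ha)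
      rw [hof]
      by_cases hx : x ∈ l
      · have : PySem.Set.add (PySem.Set.ofList l) x = PySem.Set.ofList l := by
          simp only [PySem.Set.add, PySem.Set.contains]
          rw [if_pos]
          simpa using (PySem.List.mem_dedup l x).2 hx
        rw [this]
        exact List.Pairwise.imp_of_mem
          (fun {a b} ha hb h => by rw [hkeep a ha, hkeep b hb]; exact h) ih
      · have : PySem.Set.add (PySem.Set.ofList l) x = PySem.Set.ofList l ++ [x] := by
          simp only [PySem.Set.add, PySem.Set.contains]
          rw [if_neg]
          intro h
          exact absurd ((PySem.List.mem_dedup l x).1 (by simpa using h)) hx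
        rw [this, List.pairwise_append]
        refine ⟨List.Pairwise.imp_of_mem
          (fun {a b} ha hb h => by rw [hkeep a ha, hkeep b hb]; exact h) ih, by simp, ?_⟩
        intro a ha b hb
        simp only [List.mem_singleton] at hb
        subst hb
        rw [hkeep a ha, PySem.List.index?_append_singleton_self _ _ hx]
        have hal : a ∈ l := hmemof a ha
        obtain ⟨k, hk⟩ := Option.isSome_iff_exists.1 ((PySem.List.index?_isSome_iff _ _).2 hal)
        obtain ⟨hklen, -, -⟩ := PySem.List.getElem_of_index?_eq_some hk
        rw [hk]
        simp
        exact_mod_cast hklen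

-- keys of the swapped enumerate are exactly the underlying list
lemma map_fst_swap_enum (d : List String) :
    (((PySem.List.enumerate d 0).map (fun p => (p.2, p.1))).map (fun p => p.1)) = d := by
  simp [List.map_map, Function.comp_def, PySem.List.map_snd_enumerate]

-- membership test on the swapped-enumerate dict is list membership
lemma any_swap_enum (d : List String) (x : String) :
    (((PySem.List.enumerate d 0).map (fun p => (p.2, p.1))).any (fun p => p.1 == x)) = d.contains x := by
  rw [List.any_map]
  conv_rhs => rw [← PySem.List.map_snd_enumerate d 0, ← List.any_beq']
  rw [List.any_map]
  rfl

-- the next index is fresh for the reverse dict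
lemma enum_fresh (d : List String) :
    ((PySem.List.enumerate d 0).any (fun p => p.1 == (d.length : Int))) = false := by
  rw [List.any_eq_false]
  intro p hp
  rcases (PySem.List.mem_enumerate_iff d 0 p).1 hp with ⟨k, hk, rfl⟩
  simp only [beq_iff_eq]
  omega

lemma nodup_fst_enum (d : List String) :
    ((PySem.List.enumerate d 0).map (fun p => p.1)).Nodup := by
  have h := PySem.List.pairwise_lt_enumerate d 0
  exact List.pairwise_map.mpr (h.imp fun hlt => ne_of_lt hlt)

-- Dict.ofList on a nodup-keyed pair list keeps the list as items
lemma ofList_items_of_nodup {κ ν : Type} [BEq κ] [LawfulBEq κ] (ps : List (κ × ν))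
    (h : (ps.map (fun p => p.1)).Nodup) : (PySem.Dict.ofList ps).items = ps := by
  show (ps.foldl (fun acc p => acc.insert p.1 p.2) PySem.Dict.empty).items = ps
  have := PySem.Dict.items_foldl_insert_fresh ps (fun p => p.1) (fun p => p.2) PySem.Dict.empty
    (fun a _ => by simp [PySem.Dict.contains_empty]) h
  simpa using this

-- the loop invariant of A's vertex-numbering fold, over the flattened vertex stream
lemma fold_step_eq (xs : List String) :
    xs.foldl mapVerticesStep (PySem.Dict.empty, PySem.Dict.empty, 0) =
      (PySem.Dict.mk ((PySem.List.enumerate (PySem.List.dedup xs)).map (fun p => (p.2, p.1))),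
       PySem.Dict.mk (PySem.List.enumerate (PySem.List.dedup xs)),
       ((PySem.List.dedup xs).length : Int)) := by
  induction xs using List.reverseRecOn with
  | nil => rfl
  | append_singleton l x ih =>
      rw [List.foldl_append, List.foldl_cons, List.foldl_nil, ih]
      have hded : PySem.List.dedup (l ++ [x]) = PySem.Set.add (PySem.List.dedup l) x := by
        simp [PySem.List.dedup, PySem.Set.ofList, List.foldl_append]
      have hc1 : (PySem.Dict.mk ((PySem.List.enumerate (PySem.List.dedup l)).map
          (fun p => (p.2, p.1)))).contains x = (PySem.List.dedup l).contains x := by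
        simp only [PySem.Dict.contains_mk]
        exact any_swap_enum _ x
      simp only [mapVerticesStep]
      rw [hc1]
      by_cases hc : (PySem.List.dedup l).contains x
      · have hm : x ∈ l := (PySem.List.mem_dedup l x).1 (List.contains_iff_mem.mp hc)
        rw [if_pos hc, hded]
        simp [PySem.Set.add, PySem.Set.contains, hm]
      · have hm : x ∉ l := fun h => hc (List.contains_iff_mem.mpr ((PySem.List.mem_dedup l x).2 h))
        rw [if_neg (by simp [hm]), hded]
        have hadd : PySem.Set.add (PySem.List.dedup l) x = PySem.List.dedup l ++ [x] := by
          simp [PySem.Set.add, PySem.Set.contains, hm]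
        rw [hadd]
        refine Prod.ext ?_ (Prod.ext ?_ ?_)
        · apply PySem.Dict.ext
          rw [PySem.Dict.items_insert_of_not_contains]
          · simp [PySem.List.enumerate_append]
          · rw [hc1]
            exact (Bool.not_eq_true _).mp hc
        · apply PySem.Dict.ext
          rw [PySem.Dict.items_insert_of_not_contains]
          · simp [PySem.List.enumerate_append]
          · simp only [PySem.Dict.contains_mk]
            exact enum_fresh _
        · simp only [List.length_append, List.length_cons, List.length_nil]
          push_cast
          ring

-- A's per-edge double step is the fold of the single step over the flattened stream
lemma fold_edges_eq_flat (edges : List (String × String))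
    (st : PySem.Dict String Int × PySem.Dict Int String × Int) :
    edges.foldl (fun st uv => mapVerticesStep (mapVerticesStep st uv.1) uv.2) st =
      (edges.flatMap (fun uv => [uv.1, uv.2])).foldl mapVerticesStep st := by
  induction edges generalizing st with
  | nil => rfl
  | cons e es ih => simp [List.flatMap_cons, ih]

-- B's sort of set(flat) by first-occurrence index is exactly the first-appearance order
lemma sorted_eq_ofList (flat : List String) :
    PySem.List.sorted (PySem.Set.ofList flat)
      (fun x => (((PySem.List.index? flat x).getD 0 : Nat) : Int)) false =
    PySem.Set.ofList flat :=
  PySem.List.sorted_eq_of_perm_of_pairwise_lt _ _ _ (List.Perm.refl _) (pairwise_idx flat)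

-- ===== VERDICT (by name: the statement is the Claim_ definition above) =====
theorem map_vertices_spec : Claim_equal_map_vertices := by
  intro edges _
  show map_vertices edges = map_vertices_alt edges
  simp only [map_vertices, map_vertices_alt]
  rw [fold_edges_eq_flat, fold_step_eq, sorted_eq_ofList]
  have hdd : PySem.List.dedup (edges.flatMap (fun uv => [uv.1, uv.2])) =
      PySem.Set.ofList (edges.flatMap (fun uv => [uv.1, uv.2])) := by
    simp
  rw [hdd]
  set d := PySem.Set.ofList (edges.flatMap (fun uv => [uv.1, uv.2])) with hd
  have hnd : d.Nodup := by
    rw [hd, ← PySem.List.dedup_eq_ofList]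
    exact PySem.List.nodup_dedup _
  have hk : (((PySem.List.enumerate d 0).map (fun p => (p.2, p.1))).map (fun p => p.1)).Nodup := by
    rw [map_fst_swap_enum]; exact hnd
  have h1 : (PySem.Dict.ofList ((PySem.List.enumerate d 0).map (fun p => (p.2, p.1)))) =
      PySem.Dict.mk ((PySem.List.enumerate d 0).map (fun p => (p.2, p.1))) :=
    PySem.Dict.ext (ofList_items_of_nodup _ hk)
  have h2 : (PySem.Dict.ofList (PySem.List.enumerate d 0)).items = PySem.List.enumerate d 0 :=
    ofList_items_of_nodup _ (nodup_fst_enum d)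
  simp [h1, h2]
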